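-- pv_equiv track=rewrite | github.com/hong-sh/coding_test_practice | week4/n_number.py | solution
-- ===== SOURCE A (Python) =====
-- def convert(n, base):
--     T = "0123456789ABCDEF"
--     q, r = divmod(n, base)
--     if q == 0:
--         return T[r]
--     else:
--         return convert(q, base) + T[r]
--
-- def solution(n, t, m, p):
--     answer = ''
--     number = 0
--     converted_num = ""
--     while len(converted_num) < t * m:
--         converted_num += convert(number, n)
--         number += 1
--
--     i = p-1
--     while len(answer) < t:
--         answer += converted_num[i]
--         i = i + m
--
--     return answer
-- ===== SOURCE B (Python) =====
-- def convert(n, base):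
--     T = "0123456789ABCDEF"
--     digits = []
--     while True:
--         n, r = divmod(n, base)
--         digits.append(T[r])
--         if n == 0:
--             break
--     return ''.join(reversed(digits))
--
--
-- def locate(chunks, i):
--     for s in chunks:
--         if i < len(s):
--             return s[i]
--         i -= len(s)
--     raise IndexError('string index out of range')
--
--
-- def solution(n, t, m, p):
--     chunks = []
--     total = 0
--     number = 0
--     while total < t * m:
--         s = convert(number, n)
--         chunks.append(s)
--         total += len(s)
--         number += 1
--     out = []
--     for k in range(t):
--         i = p - 1 + k * m
--         if i < 0 or i >= total:
--             raise IndexError('string index out of range')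
--         out.append(locate(chunks, i))
--     return ''.join(out)
-- ===== Notes on version B (the rewrite author's own statement) =====
-- stated objective: alternative
-- what changed: B converts each number iteratively (digit list + reverse) instead of recursively, and keeps the converted numbers as a list of chunks with a running total length, locating each of the t target positions by walking the chunk list, instead of concatenating one flat buffer string and indexing into it.
-- outside the precondition, e.g. on solution(10, 1, 1, 0): A returns '0', B raises IndexError; on solution(20, 1, 1, 1): A returns '0', B returns '0'; on solution(2, 17, 1, 2): A returns '11011100101110111', B returns '11011100101110111'
import Mathlib
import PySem

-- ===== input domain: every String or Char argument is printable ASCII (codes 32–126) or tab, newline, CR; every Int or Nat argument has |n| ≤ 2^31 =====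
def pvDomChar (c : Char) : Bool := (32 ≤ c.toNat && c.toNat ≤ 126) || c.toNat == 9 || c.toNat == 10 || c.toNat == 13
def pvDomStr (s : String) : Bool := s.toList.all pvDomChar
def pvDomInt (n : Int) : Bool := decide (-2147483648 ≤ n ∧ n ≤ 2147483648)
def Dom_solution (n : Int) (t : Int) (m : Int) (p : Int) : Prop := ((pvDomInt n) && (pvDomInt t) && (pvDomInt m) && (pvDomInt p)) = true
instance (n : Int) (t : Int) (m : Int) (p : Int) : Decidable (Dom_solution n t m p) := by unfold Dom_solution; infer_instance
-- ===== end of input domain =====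

-- B replaces A's recursive digit conversion and flat concatenated buffer by an iterative
-- conversion and a list of chunks with a running total length, locating each target position
-- by walking the chunk list (objective: alternative decomposition, same cost).

-- ===== PORT A =====
-- T = "0123456789ABCDEF"
def pvT : List Char := ['0','1','2','3','4','5','6','7','8','9','A','B','C','D','E','F']

-- convert(n, base), recursive; fuel only makes the recursion total (128 levels cover every
-- number the admitted inputs can reach); [] marks the paths where Python raises.
def convA : Nat → Int → Int → List Char
  | 0, _, _ => []                      -- fuel exhausted (unreachable on admitted inputs)
  | f+1, k, base =>
    match PySem.Int.divmod? k base with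
    | none => []                       -- ZeroDivisionError
    | some (q, r) =>
      match PySem.List.pyGet? pvT r with
      | none => []                     -- IndexError on T[r]
      | some d => if q = 0 then [d] else convA f q base ++ [d]

-- while len(converted_num) < t*m: converted_num += convert(number, n); number += 1
def buildA (n tm : Int) : Nat → Int → List Char → List Char
  | 0, _, s => s                       -- fuel guard; (t*m).toNat iterations always suffice
  | f+1, number, s =>
    if (s.length : Int) < tm then buildA n tm f (number+1) (s ++ convA 128 number n) else s

-- while len(answer) < t: answer += converted_num[i]; i = i + m
def pickA (L : List Char) (t m : Int) : Nat → List Char → Int → List Char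
  | 0, ans, _ => ans                   -- fuel guard; t.toNat iterations always suffice
  | f+1, ans, i =>
    if (ans.length : Int) < t then
      match PySem.List.pyGet? L i with
      | none => ans                    -- IndexError
      | some c => pickA L t m f (ans ++ [c]) (i + m)
    else ans

def solution (n : Int) (t : Int) (m : Int) (p : Int) : String :=
  let converted_num := buildA n (t*m) (t*m).toNat 0 []
  String.ofList (pickA converted_num t m t.toNat [] (p-1))

-- ===== PORT B =====
-- convert(n, base), iterative: append digits, then reverse; fuel for totality only.
def convBLoop : Nat → Int → Int → List Char → List Char
  | 0, _, _, digits => digits.reverse  -- fuel exhausted (unreachable on admitted inputs)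
  | f+1, k, base, digits =>
    match PySem.Int.divmod? k base with
    | none => digits.reverse           -- ZeroDivisionError
    | some (q, r) =>
      match PySem.List.pyGet? pvT r with
      | none => digits.reverse         -- IndexError on T[r]
      | some d => if q = 0 then (digits ++ [d]).reverse else convBLoop f q base (digits ++ [d])

def convB (k : Int) (base : Int) : List Char := convBLoop 128 k base []

-- while total < t*m: s = convert(number, n); chunks.append(s); total += len(s); number += 1
def buildB (n tm : Int) : Nat → Int → Int → List (List Char) → (List (List Char) × Int)
  | 0, _, total, chunks => (chunks, total)
  | f+1, number, total, chunks =>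
    if total < tm then
      let s := convB number n
      buildB n tm f (number+1) (total + (s.length : Int)) (chunks ++ [s])
    else (chunks, total)

-- locate(chunks, i): walk the chunk list subtracting lengths; [] marks the IndexError path.
def locateB : List (List Char) → Int → List Char
  | [], _ => []                        -- IndexError (unreachable after the bounds check)
  | c :: rest, i =>
    if i < (c.length : Int) then
      match PySem.List.pyGet? c i with
      | some ch => [ch]
      | none => []                     -- negative index: not reached after the bounds check
    else locateB rest (i - (c.length : Int))

def solution_alt (n : Int) (t : Int) (m : Int) (p : Int) : String :=
  let bt := buildB n (t*m) (t*m).toNat 0 0 []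
  let out := (PySem.List.pyRange 0 t 1).foldl
    (fun acc k =>
      let i := p - 1 + k * m
      if i < 0 ∨ bt.2 ≤ i then acc     -- raise IndexError
      else acc ++ [locateB bt.1 i]) []
  String.ofList out.flatten                -- ''.join(out)

-- ===== PRECONDITION & SPEC =====
-- Pre_ admits bases whose digits stay inside the 16-char table (2..16 and, via Python's
-- divisor-signed divmod, also -16..-2), with the problem's 1 ≤ p ≤ m when t ≥ 1, plus the
-- degenerate t ≤ 0, t*m ≤ 0 region where A returns '' for any base; outside it A raises
-- (ZeroDivisionError / RecursionError / IndexError) or its value is an accident of a negative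
-- answer index p-1 wrapping around or of how far the digit buffer happens to overshoot t*m.
def Pre_solution (n : Int) (t : Int) (m : Int) (p : Int) : Prop :=
  (t ≤ 0 ∧ t * m ≤ 0) ∨
  ((2 ≤ n ∧ n ≤ 16 ∨ -16 ≤ n ∧ n ≤ -2) ∧ (t ≤ 0 ∨ (1 ≤ m ∧ 1 ≤ p ∧ p ≤ m)))
instance (n : Int) (t : Int) (m : Int) (p : Int) : Decidable (Pre_solution n t m p) := by unfold Pre_solution; infer_instance

def pvWitness_solution : Int × Int × Int × Int := (2, 4, 2, 1)

def Spec_solution (n : Int) (t : Int) (m : Int) (p : Int) (out : String) : Prop := out = solution_alt n t m p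
instance (n : Int) (t : Int) (m : Int) (p : Int) (out : String) : Decidable (Spec_solution n t m p out) := by unfold Spec_solution; infer_instance

-- ===== CLAIM (what is proved, stated in full; the proofs are below) =====
def Claim_equal_solution : Prop := ∀ (n : Int) (t : Int) (m : Int) (p : Int), Dom_solution n t m p → Pre_solution n t m p → Spec_solution n t m p (solution n t m p)

-- ===== LEMMAS AND PROOFS =====

-- B's conversion loop is A's recursive conversion followed by the accumulated digits.
theorem convBLoop_eq (f : Nat) : ∀ (k base : Int) (digits : List Char),
    convBLoop f k base digits = convA f k base ++ digits.reverse := by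
  induction f with
  | zero => intro k base digits; simp [convBLoop, convA]
  | succ f ih =>
      intro k base digits
      simp only [convBLoop, convA]
      cases hd : PySem.Int.divmod? k base with
      | none => simp
      | some qr =>
          obtain ⟨q, r⟩ := qr
          cases hg : PySem.List.pyGet? pvT r with
          | none => simp [hg]
          | some d => by_cases hq : q = 0 <;> simp [hg, hq, ih]

theorem convB_eq (k base : Int) : convB k base = convA 128 k base := by
  simp [convB, convBLoop_eq]

-- Every in-range index of the digit table (negative ones wrap) yields a digit.
theorem pvT_get (r : Int) (h1 : -16 ≤ r) (h2 : r < 16) :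
    ∃ d, PySem.List.pyGet? pvT r = some d := by
  interval_cases r <;> exact ⟨_, rfl⟩

-- On an admitted base the conversion yields at least one digit.
theorem convA_nonempty (f : Nat) (k base : Int)
    (hb : 2 ≤ base ∧ base ≤ 16 ∨ -16 ≤ base ∧ base ≤ -2) :
    1 ≤ (convA (f+1) k base).length := by
  have hb0 : base ≠ 0 := by omega
  have hr : -16 ≤ PySem.Int.mod k base ∧ PySem.Int.mod k base < 16 := by
    rcases hb with ⟨h1, h2⟩ | ⟨h1, h2⟩
    · have := PySem.Int.mod_nonneg k (show (0:Int) < base by omega)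
      have := PySem.Int.mod_lt k (show (0:Int) < base by omega)
      omega
    · have := PySem.Int.mod_neg_bounds k (show base < (0:Int) by omega)
      omega
  have hdm : PySem.Int.divmod? k base = some (PySem.Int.floordiv k base, PySem.Int.mod k base) := by
    simp [PySem.Int.divmod?, PySem.Int.floordiv, PySem.Int.mod, hb0]
  obtain ⟨d, hd⟩ := pvT_get (PySem.Int.mod k base) hr.1 hr.2
  simp only [convA, hdm, hd]
  by_cases hq : PySem.Int.floordiv k base = 0 <;> simp [hq]

-- buildB carries exactly the chunks whose concatenation is buildA's buffer, and a correct total.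
theorem buildB_eq (n tm : Int) (f : Nat) : ∀ (number total : Int) (chunks : List (List Char)),
    total = ((chunks.flatten).length : Int) →
    (buildB n tm f number total chunks).1.flatten = buildA n tm f number chunks.flatten ∧
    (buildB n tm f number total chunks).2 = (((buildB n tm f number total chunks).1.flatten).length : Int) := by
  induction f with
  | zero => intro number total chunks h; simp [buildB, buildA, h]
  | succ f ih =>
      intro number total chunks h
      simp only [buildB, buildA]
      rw [h]
      by_cases hc : ((chunks.flatten).length : Int) < tm
      · rw [if_pos hc, if_pos hc]
        have := ih (number+1) (((chunks.flatten).length : Int) + ((convB number n).length : Int))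
          (chunks ++ [convB number n]) (by simp)
        simpa [convB_eq, List.flatten_append] using this
      · rw [if_neg hc, if_neg hc]
        exact ⟨rfl, rfl⟩

-- If the fuel is at least tm minus the current length, buildA ends with length ≥ tm.
theorem buildA_len (n tm : Int) (hb : 2 ≤ n ∧ n ≤ 16 ∨ -16 ≤ n ∧ n ≤ -2) (f : Nat) :
    ∀ (number : Int) (s : List Char), tm ≤ (s.length : Int) + f →
    tm ≤ ((buildA n tm f number s).length : Int) := by
  induction f with
  | zero => intro number s h; simpa [buildA] using h
  | succ f ih =>
      intro number s h
      simp only [buildA]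
      by_cases hc : ((s.length : Int)) < tm
      · simp only [hc, if_pos]
        have h1 : 1 ≤ (convA 128 number n).length := by
          have := convA_nonempty 127 number n hb
          simpa using this
        apply ih (number+1)
        simp only [List.length_append, Nat.cast_add]
        omega
      · simpa [hc] using (by omega : tm ≤ ((s.length : Int)))

-- Walking the chunk list finds exactly the character of the concatenation.
theorem locateB_eq (chunks : List (List Char)) : ∀ (i : Int), 0 ≤ i →
    i < ((chunks.flatten).length : Int) →
    locateB chunks i = (chunks.flatten)[i.toNat]?.toList := by
  induction chunks with
  | nil => intro i h0 h1; simp at h1; omega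
  | cons c rest ih =>
      intro i h0 h1
      simp only [locateB, List.flatten_cons]
      by_cases hc : i < (c.length : Int)
      · have hlt : i.toNat < c.length := by omega
        rw [if_pos hc, PySem.List.pyGet?_of_nonneg_of_lt c h0 (by exact_mod_cast hc)]
        rw [List.getElem?_append_left hlt, List.getElem?_eq_getElem hlt]
        simp
      · rw [if_neg hc, ih (i - c.length) (by omega) (by simp at h1 ⊢; omega)]
        rw [List.getElem?_append_right (by omega)]
        have hnn : (i - (c.length : Int)).toNat = i.toNat - c.length := by omega
        rw [hnn]

-- the pick phase, written as a straight recursion on the number of characters still needed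
def picksH (L : List Char) (m : Int) : Nat → Int → List Char
  | 0, _ => []
  | f+1, i =>
    (match PySem.List.pyGet? L i with | some c => [c] | none => []) ++ picksH L m f (i+m)

-- A's answer loop appends one character per step: it is ans followed by the picked characters.
theorem pickA_eq (L : List Char) (t m : Int) (f : Nat) :
    ∀ (ans : List Char) (i : Int), (ans.length : Int) = t - f →
    (∀ j : Nat, j < f → 0 ≤ i + j * m ∧ i + j * m < (L.length : Int)) →
    pickA L t m f ans i = ans ++ picksH L m f i := by
  induction f with
  | zero => intro ans i h _; simp [pickA, picksH]
  | succ f ih =>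
      intro ans i h hj
      have h0 := hj 0 (by omega)
      simp only [Nat.cast_zero, zero_mul, add_zero] at h0
      have hcond : (ans.length : Int) < t := by omega
      simp only [pickA, picksH, if_pos hcond]
      rw [PySem.List.pyGet?_of_nonneg_of_lt L h0.1 h0.2,
        List.getElem?_eq_getElem (by omega : i.toNat < L.length)]
      show pickA L t m f (ans ++ [L[i.toNat]]) (i + m)
          = ans ++ ([L[i.toNat]] ++ picksH L m f (i + m))
      rw [ih (ans ++ [L[i.toNat]]) (i + m) (by simp; omega)
        (by intro j hjf
            have := hj (j+1) (by omega)
            push_cast at this ⊢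
            constructor <;> nlinarith [this.1, this.2])]
      simp

-- B's bounds-checked fold over range(t) picks the same characters.
theorem foldB_aux (L : List Char) (chunks : List (List Char)) (hL : L = chunks.flatten)
    (total t m p : Int) (htot : total = (L.length : Int))
    (hidx : ∀ k : Int, 0 ≤ k → k < t → 0 ≤ p - 1 + k * m ∧ p - 1 + k * m < total)
    (g : Nat) :
    ∀ (a : Int) (acc : List (List Char)), 0 ≤ a → a ≤ t → (t - a).toNat = g →
    ((PySem.List.pyRange a t 1).foldl
      (fun acc k =>
        if p - 1 + k * m < 0 ∨ total ≤ p - 1 + k * m then acc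
        else acc ++ [locateB chunks (p - 1 + k * m)]) acc).flatten
    = acc.flatten ++ picksH L m g (p - 1 + a * m) := by
  induction g with
  | zero =>
      intro a acc h0 h1 hg
      have : t = a := by omega
      rw [this, PySem.List.pyRange_one_eq_nil (le_refl a)]
      simp [picksH]
  | succ g ih =>
      intro a acc h0 h1 hg
      have hat : a < t := by omega
      rw [PySem.List.pyRange_one_cons hat]
      simp only [List.foldl_cons]
      have hb := hidx a h0 hat
      rw [if_neg (by omega)]
      rw [ih (a+1) _ (by omega) (by omega) (by omega)]
      have hloc : locateB chunks (p - 1 + a * m) = (L[(p - 1 + a * m).toNat]?).toList := by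
        rw [locateB_eq chunks _ hb.1 (by rw [← hL]; omega), hL]
      have hget : PySem.List.pyGet? L (p - 1 + a * m) = L[(p - 1 + a * m).toNat]? :=
        PySem.List.pyGet?_of_nonneg_of_lt L hb.1 (by omega)
      have harith : p - 1 + (a + 1) * m = (p - 1 + a * m) + m := by ring
      rw [harith]
      simp only [picksH, List.flatten_append, List.flatten_cons, List.flatten_nil,
        List.append_nil, List.append_assoc, hloc, hget]
      cases L[(p - 1 + a * m).toNat]? <;> simp

-- ===== VERDICT (by name: the statement is the Claim_ definition above) =====
theorem solution_spec : Claim_equal_solution := by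
  intro n t m p _ hpre
  unfold Spec_solution
  by_cases ht : t ≤ 0
  · have htn : t.toNat = 0 := by omega
    simp [solution, solution_alt, htn, pickA, PySem.List.pyRange_one_eq_nil ht]
  · have ht1 : 1 ≤ t := by omega
    obtain ⟨hb, hm1, hp1, hpm⟩ :
        (2 ≤ n ∧ n ≤ 16 ∨ -16 ≤ n ∧ n ≤ -2) ∧ 1 ≤ m ∧ 1 ≤ p ∧ p ≤ m := by
      rcases hpre with ⟨h, _⟩ | ⟨hb, h | h⟩
      · omega
      · omega
      · exact ⟨hb, h⟩
    have htm1 : 1 ≤ t * m := by nlinarith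
    have hB := buildB_eq n (t*m) (t*m).toNat 0 0 [] (by simp)
    simp only [List.flatten_nil] at hB
    have hlen : t * m ≤ ((buildA n (t*m) (t*m).toNat 0 []).length : Int) :=
      buildA_len n (t*m) hb (t*m).toNat 0 []
        (by simp only [List.length_nil, Nat.cast_zero, zero_add]; omega)
    have hidx : ∀ k : Int, 0 ≤ k → k < t →
        0 ≤ p - 1 + k * m ∧ p - 1 + k * m < ((buildA n (t*m) (t*m).toNat 0 []).length : Int) := by
      intro k hk0 hkt
      have h1 : 0 ≤ k * m := mul_nonneg hk0 (by omega)
      have h2 : k * m ≤ (t - 1) * m := mul_le_mul_of_nonneg_right (by omega) (by omega)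
      have h3 : (t - 1) * m = t * m - m := by ring
      omega
    show String.ofList (pickA (buildA n (t*m) (t*m).toNat 0 []) t m t.toNat [] (p-1)) = _
    rw [pickA_eq _ t m t.toNat [] (p-1) (by simp only [List.length_nil, Nat.cast_zero]; omega)
      (by intro j hj
          have := hidx (j : Int) (by omega) (by omega)
          omega)]
    show _ = String.ofList (((PySem.List.pyRange 0 t 1).foldl _ []).flatten)
    rw [foldB_aux (buildA n (t*m) (t*m).toNat 0 []) (buildB n (t*m) (t*m).toNat 0 0 []).1
      hB.1.symm (buildB n (t*m) (t*m).toNat 0 0 []).2 t m p (by rw [hB.2, hB.1])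
      (by intro k hk0 hkt; rw [hB.2, hB.1]; exact hidx k hk0 hkt)
      t.toNat 0 [] (le_refl 0) (by omega) (by omega)]
    simp
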